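-- pv_equiv track=rewrite | github.com/avinashkranjan/Amazing-Python-Scripts | text_encryption/encryption_method.py | transposition_cipher_encrypt
-- ===== SOURCE A (Python) =====
-- def transposition_cipher_encrypt(text, key):
--     ciphertext = [''] * int(key)
--     for column in range(int(key)):
--         currentIndex = column
--         while currentIndex < len(text):
--             ciphertext[column] += text[currentIndex]
--             currentIndex += int(key)
--
--     return ''.join(ciphertext)
-- ===== SOURCE B (Python) =====
-- def transposition_cipher_encrypt(text, key):
--     n = int(key)
--     if n <= 0:
--         return ''
--     cols = [[] for _ in range(n)]
--     col = 0
--     for ch in text: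
--         cols[col].append(ch)
--         col += 1
--         if col == n:
--             col = 0
--     return ''.join(''.join(c) for c in cols)
-- ===== Notes on version B (the rewrite author's own statement) =====
-- stated objective: alternative
-- what changed: Replaces A's per-column strided scans (and repeated string concatenation) with a single sequential pass that scatters each character into its column bucket via a resetting column counter, then joins the buckets.
import Mathlib
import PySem

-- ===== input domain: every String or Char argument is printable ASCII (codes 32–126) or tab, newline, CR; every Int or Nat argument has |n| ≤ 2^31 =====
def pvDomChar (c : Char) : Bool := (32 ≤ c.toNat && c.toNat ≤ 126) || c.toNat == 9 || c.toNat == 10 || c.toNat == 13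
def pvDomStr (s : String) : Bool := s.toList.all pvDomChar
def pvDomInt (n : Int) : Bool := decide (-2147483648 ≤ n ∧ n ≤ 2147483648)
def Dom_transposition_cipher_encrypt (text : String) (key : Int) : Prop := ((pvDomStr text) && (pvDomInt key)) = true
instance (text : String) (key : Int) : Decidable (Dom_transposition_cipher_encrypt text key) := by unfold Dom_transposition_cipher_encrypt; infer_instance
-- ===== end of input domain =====

-- B replaces A's per-column strided scans with one sequential pass scattering each
-- character into its column bucket via a resetting column counter (alternative
-- decomposition, same asymptotic cost).

-- ===== PORT A =====
-- the inner 'while currentIndex < len(text)' loop of A, collecting text[c], text[c+k], …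
-- fuel only guards totality (k = 0 never reaches the loop since range(0) is empty);
-- with k ≥ 1, fuel = cs.length is enough: after cs.length steps the index is ≥ cs.length.
def whileLoopA (cs : List Char) (k : Nat) : Nat → Nat → List Char
  | 0, _ => []
  | fuel+1, i => if i < cs.length then cs.getD i default :: whileLoopA cs k fuel (i + k) else []

def transposition_cipher_encrypt (text : String) (key : Int) : String :=
  String.ofList ((PySem.List.pyRange 0 key 1).map
    (fun column => whileLoopA text.toList key.toNat text.toList.length column.toNat)).flatten

-- ===== PORT B =====
-- one step of B's loop body: append ch to cols[col], advance col, reset at n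
def bStep (n : Nat) (st : List (List Char) × Nat) (ch : Char) : List (List Char) × Nat :=
  let cols := st.1.set st.2 (st.1.getD st.2 [] ++ [ch])
  let col := if st.2 + 1 = n then 0 else st.2 + 1
  (cols, col)

def transposition_cipher_encrypt_alt (text : String) (key : Int) : String :=
  if key ≤ 0 then "" else
    String.ofList
      (text.toList.foldl (bStep key.toNat) (List.replicate key.toNat [], 0)).1.flatten

-- ===== PRECONDITION & SPEC =====
def Spec_transposition_cipher_encrypt (text : String) (key : Int) (out : String) : Prop := out = transposition_cipher_encrypt_alt text key
instance (text : String) (key : Int) (out : String) : Decidable (Spec_transposition_cipher_encrypt text key out) := by unfold Spec_transposition_cipher_encrypt; infer_instance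

-- ===== CLAIM (what is proved, stated in full; the proofs are below) =====
def Claim_equal_transposition_cipher_encrypt : Prop := ∀ (text : String) (key : Int), Dom_transposition_cipher_encrypt text key → Spec_transposition_cipher_encrypt text key (transposition_cipher_encrypt text key)

-- ===== LEMMAS AND PROOFS =====

-- the characters B's pass puts into column c of n, starting with counter col
def bucketSpec (n c : Nat) : List Char → Nat → List Char
  | [], _ => []
  | ch :: cs, col =>
      (if col = c then [ch] else []) ++ bucketSpec n c cs (if col + 1 = n then 0 else col + 1)

theorem whileLoopA_nil (k : Nat) : ∀ fuel i, whileLoopA [] k fuel i = [] := by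
  intro fuel i
  cases fuel with
  | zero => rfl
  | succ f => simp [whileLoopA]

theorem whileLoopA_shift (ch : Char) (cs : List Char) (k : Nat) :
    ∀ fuel j, whileLoopA (ch :: cs) k fuel (j + 1) = whileLoopA cs k fuel j := by
  intro fuel
  induction fuel with
  | zero => intro j; rfl
  | succ f ih =>
      intro j
      simp only [whileLoopA, List.length_cons, List.getD_cons_succ]
      rw [Nat.add_right_comm j 1 k, ih (j + k)]
      simp only [Nat.add_lt_add_iff_right]

theorem bucketSpec_eq_whileLoopA (n c : Nat) (hc : c < n) :
    ∀ (cs : List Char) (fuel col s : Nat), col < n → cs.length ≤ fuel →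
      s = (if col ≤ c then c - col else c + n - col) →
      bucketSpec n c cs col = whileLoopA cs n fuel s := by
  intro cs
  induction cs with
  | nil => intro fuel col s _ _ _; rw [whileLoopA_nil]; rfl
  | cons ch cs ih =>
      intro fuel col s hcol hfuel hs
      simp only [List.length_cons] at hfuel
      obtain ⟨f, rfl⟩ : ∃ f, fuel = f + 1 := ⟨fuel - 1, by omega⟩
      split at hs
      all_goals by_cases hec : col = c
      · -- col ≤ c, col = c
        subst hec
        have hs0 : s = 0 := by omega
        subst hs0
        simp only [bucketSpec, whileLoopA, List.length_cons, if_true, List.cons_append, List.nil_append]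
        rw [if_pos (show (0:Nat) < cs.length + 1 by omega), List.getD_cons_zero]
        rw [show (0 + n) = (n - 1) + 1 by omega, whileLoopA_shift]
        congr 1
        exact ih f (if col + 1 = n then 0 else col + 1) (n - 1)
          (by split <;> omega) (by omega) (by split <;> split <;> omega)
      · -- col ≤ c, col ≠ c
        have hs1 : 1 ≤ s := by omega
        simp only [bucketSpec, if_neg hec, List.nil_append]
        rw [show s = (s - 1) + 1 by omega, whileLoopA_shift]
        exact ih (f + 1) (if col + 1 = n then 0 else col + 1) (s - 1)
          (by split <;> omega) (by omega) (by split <;> split <;> omega)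
      · omega
      · -- c < col
        have hs1 : 1 ≤ s := by omega
        simp only [bucketSpec, if_neg hec, List.nil_append]
        rw [show s = (s - 1) + 1 by omega, whileLoopA_shift]
        exact ih (f + 1) (if col + 1 = n then 0 else col + 1) (s - 1)
          (by split <;> omega) (by omega) (by split <;> split <;> omega)

theorem foldB_invariant (n : Nat) (hn : 0 < n) :
    ∀ (cs : List Char) (R : List (List Char)) (col : Nat), col < n → R.length = n →
      (cs.foldl (bStep n) (R, col)).1.length = n ∧
      ∀ c, c < n → (cs.foldl (bStep n) (R, col)).1.getD c [] = R.getD c [] ++ bucketSpec n c cs col := by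
  intro cs
  induction cs with
  | nil => intro R col _ hR; exact ⟨hR, fun c _ => by simp [bucketSpec]⟩
  | cons ch cs ih =>
      intro R col hcol hR
      simp only [List.foldl_cons, bStep]
      have hcol' : (if col + 1 = n then 0 else col + 1) < n := by split <;> omega
      have hlen : (R.set col (R.getD col [] ++ [ch])).length = n := by simp [hR]
      obtain ⟨h1, h2⟩ := ih (R.set col (R.getD col [] ++ [ch])) _ hcol' hlen
      refine ⟨h1, fun c hc => ?_⟩
      rw [h2 c hc]
      simp only [bucketSpec]
      by_cases hec : col = c
      · subst hec
        have : (R.set col (R.getD col [] ++ [ch])).getD col [] = R.getD col [] ++ [ch] := by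
          simp only [List.getD, List.getElem?_set, if_pos (by omega : col < R.length)]
          rfl
        rw [this, if_pos rfl, List.append_assoc]
      · have : (R.set col (R.getD col [] ++ [ch])).getD c [] = R.getD c [] := by
          simp only [List.getD, List.getElem?_set, if_neg hec]
        rw [this, if_neg hec, List.nil_append]

theorem colsB_eq (cs : List Char) (n : Nat) (hn : 0 < n) :
    (cs.foldl (bStep n) (List.replicate n [], 0)).1 =
      (List.range n).map (fun c => whileLoopA cs n cs.length c) := by
  obtain ⟨h1, h2⟩ := foldB_invariant n hn cs (List.replicate n []) 0 hn (by simp)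
  apply List.ext_getElem
  · simp [h1]
  · intro i hi1 hi2
    have hin : i < n := by simpa [h1] using hi1
    have := h2 i hin
    simp only [List.getD] at this
    rw [List.getElem?_eq_getElem hi1] at this
    simp only [List.getElem?_replicate, if_pos hin, Option.getD_some, List.nil_append] at this
    rw [List.getElem_map, List.getElem_range]
    rw [this]
    exact bucketSpec_eq_whileLoopA n i hin cs cs.length 0 i hn le_rfl (by simp)

-- ===== VERDICT (by name: the statement is the Claim_ definition above) =====
theorem transposition_cipher_encrypt_spec : Claim_equal_transposition_cipher_encrypt := by
  intro text key _
  unfold Spec_transposition_cipher_encrypt transposition_cipher_encrypt transposition_cipher_encrypt_alt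
  by_cases hk : key ≤ 0
  · rw [if_pos hk, PySem.List.pyRange_one_eq_nil hk]
    rfl
  · rw [if_neg hk]
    have hn : 0 < key.toNat := by omega
    rw [colsB_eq text.toList key.toNat hn]
    congr 1
    rw [PySem.List.pyRange_one 0 key]
    simp only [List.map_map, sub_zero]
    congr 1
    apply List.map_congr_left
    intro k hk'
    simp
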